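-- pv_equiv track=rewrite | github.com/sinc-algo-study/algorithm | Wooyongjeong/220418/04 [PGS] 81303 표 편집.py | solution
-- ===== SOURCE A (Python) =====
-- from typing import List, Dict
--
-- def delete(cur: int, answer: List[str],
--            ll: Dict[int, List[int]], stack: List[List[str]]) -> int:
--     # 삭제
--     answer[cur] = 'X'
--     prev, next = ll[cur]
--     stack.append([prev, cur, next])
--
--     if prev == None:
--         # cur이 첫 행인 경우
--         ll[next][0] = None
--     elif next == None:
--         # cur이 마지막 행인 경우
--         ll[prev][1] = None
--     else:
--         ll[prev][1] = next
--         ll[next][0] = prev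
--
--     # 지운 게 마지막 행이라면 바로 이전 행을 선택해야 함
--     # 아니라면 그 다음 행
--     return ll[cur][0] if next == None else ll[cur][1]
--
-- def undo(answer: List[str],
--            ll: Dict[int, List[int]], stack: List[List[str]]) -> None:
--     # 되돌리기
--     prev, now, next = stack.pop()
--     answer[now] = 'O'
--
--     if next == None:
--         # 되돌릴 행이 마지막 행이었던 경우
--         ll[prev][1] = now
--     elif prev == None:
--         # 되돌릴 행이 첫 행이었던 경우
--         ll[next][0] = now
--     else:
--         ll[next][0] = now
--         ll[prev][1] = now
--
-- def move(cur: int, c: List[str], ll: Dict[int, List[int]]) -> int: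
--     # 위로 이동 or 아래로 이동
--     prev_or_next = 0 if c[0] == 'U' else 1
--     x = int(c[1])
--     for _ in range(x):
--         cur = ll[cur][prev_or_next]
--     return cur
--
-- def solution(n: int, k: int, cmd: List[str]) -> str:
--     answer = ['O'] * n
--     # doubly linked-list를 dict로 표현
--     ll = {i: [i - 1, i + 1] for i in range(n)}
--     ll[0] = [None, 1]
--     ll[n - 1] = [n - 2, None]
--
--     cur = k  # 현재 위치
--     stack = []  # 'Z' 명령을 위한 스택
--
--     for c in cmd:
--         c = c.split()
--         if c[0] == 'C':
--             # 삭제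
--             cur = delete(cur, answer, ll, stack)
--         elif c[0] == 'Z':
--             # 되돌리기
--             undo(answer, ll, stack)
--         else:
--             # 위 or 아래
--             cur = move(cur, c, ll)
--
--     return ''.join(answer)
-- ===== SOURCE B (Python) =====
-- def solution(n, k, cmd):
--     answer = ['O'] * n
--     deleted = set()
--     undo = []
--     cur = k
--     for c in cmd:
--         t = c.split()
--         if t[0] == 'C':
--             answer[cur] = 'X'
--             deleted.add(cur)
--             undo.append(cur)
--             j = cur + 1
--             while j < n and j in deleted:
--                 j += 1
--             if j < n:
--                 cur = j
--             else:
--                 j = cur - 1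
--                 while j in deleted:
--                     j -= 1
--                 cur = j
--         elif t[0] == 'Z':
--             y = undo.pop()
--             answer[y] = 'O'
--             deleted.discard(y)
--         else:
--             x = int(t[1])
--             if t[0] == 'U':
--                 for _ in range(x):
--                     j = cur - 1
--                     while j in deleted:
--                         j -= 1
--                     cur = j
--             else:
--                 for _ in range(x):
--                     j = cur + 1
--                     while j in deleted:
--                         j += 1
--                     cur = j
--     return ''.join(answer)
-- ===== Notes on version B (the rewrite author's own statement) =====
-- stated objective: simpler
-- what changed: Replaced the dict-based doubly linked list (with pointer re-linking on delete/undo) by a deleted-set plus a cursor that scans for the nearest live row; undo becomes a plain set removal with no pointer surgery.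
-- outside the precondition, e.g. on solution(2, 0, ['U 1']): A returns 'OO', B returns 'OO'; on solution(1, 0, ['U 1']): A returns 'O', B returns 'O'; on solution(0, 0, ['D 1']): A returns '', B returns ''
import Mathlib
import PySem

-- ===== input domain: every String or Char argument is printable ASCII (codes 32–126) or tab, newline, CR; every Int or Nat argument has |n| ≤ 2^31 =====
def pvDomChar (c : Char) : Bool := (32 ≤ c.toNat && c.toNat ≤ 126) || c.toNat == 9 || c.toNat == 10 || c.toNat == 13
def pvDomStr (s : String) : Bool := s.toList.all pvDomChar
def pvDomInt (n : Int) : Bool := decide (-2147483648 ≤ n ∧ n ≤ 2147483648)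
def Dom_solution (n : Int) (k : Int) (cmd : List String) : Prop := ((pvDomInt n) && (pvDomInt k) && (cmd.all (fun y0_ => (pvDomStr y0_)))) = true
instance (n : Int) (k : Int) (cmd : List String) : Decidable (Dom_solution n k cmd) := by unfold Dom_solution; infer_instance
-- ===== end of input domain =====

-- B replaces A's dict-based doubly linked list by a deleted-set with a scanning
-- cursor (simpler: undo is plain set removal, no pointer re-linking); same return
-- value on every admitted input.

-- ===== PORT A =====

abbrev LLDict := PySem.Dict Int (Option Int × Option Int)

-- delete(cur, answer, ll, stack)
def pyDelete (cur : Int) (ans : List String) (ll : LLDict)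
    (stack : List (Option Int × Int × Option Int)) :
    List String × LLDict × List (Option Int × Int × Option Int) × Option Int :=
  let ans := PySem.List.pySetD ans cur "X"
  let pn := ll.getD cur (none, none)          -- prev, next = ll[cur]
  let prev := pn.1
  let next := pn.2
  let stack := stack ++ [(prev, cur, next)]
  let ll :=
    if prev = none then
      match next with
      | some nx => ll.modify nx (none, none) (fun q => (none, q.2))   -- ll[next][0] = None
      | none => ll                                                     -- ll[None]: KeyError, outside Pre_
    else if next = none then
      match prev with
      | some p => ll.modify p (none, none) (fun q => (q.1, none))      -- ll[prev][1] = None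
      | none => ll
    else
      match prev, next with
      | some p, some nx =>
          (ll.modify p (none, none) (fun q => (q.1, next))).modify nx (none, none) (fun q => (prev, q.2))
      | _, _ => ll
  let ret := if next = none then (ll.getD cur (none, none)).1 else (ll.getD cur (none, none)).2
  (ans, ll, stack, ret)

-- undo(answer, ll, stack)
def pyUndo (ans : List String) (ll : LLDict)
    (stack : List (Option Int × Int × Option Int)) :
    List String × LLDict × List (Option Int × Int × Option Int) :=
  match stack.getLast? with
  | none => (ans, ll, stack)                  -- pop from empty list: IndexError, outside Pre_
  | some (prev, now, next) =>
    let stack := stack.dropLast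
    let ans := PySem.List.pySetD ans now "O"
    let ll :=
      if next = none then
        match prev with
        | some p => ll.modify p (none, none) (fun q => (q.1, some now))  -- ll[prev][1] = now
        | none => ll
      else if prev = none then
        match next with
        | some nx => ll.modify nx (none, none) (fun q => (some now, q.2))
        | none => ll
      else
        match prev, next with
        | some p, some nx =>
            (ll.modify nx (none, none) (fun q => (some now, q.2))).modify p (none, none) (fun q => (q.1, some now))
        | _, _ => ll
    (ans, ll, stack)

-- move(cur, c, ll):  for _ in range(x): cur = ll[cur][prev_or_next]
def pyMove (cur : Option Int) (up : Bool) (x : Int) (ll : LLDict) : Option Int :=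
  (List.range x.toNat).foldl (fun c _ =>
    match c with
    | some r => (let q := ll.getD r (none, none); if up then q.1 else q.2)
    | none => none) cur                        -- ll[None]: KeyError, outside Pre_

def stepA (_n : Int)
    (s : List String × LLDict × Option Int × List (Option Int × Int × Option Int))
    (c : String) :
    List String × LLDict × Option Int × List (Option Int × Int × Option Int) :=
  let (ans, ll, cur, stack) := s
  let t := PySem.Str.split₀ c
  match t with
  | [] => s                                    -- c[0]: IndexError, outside Pre_
  | w :: _ =>
    if w = "C" then
      match cur with
      | some cu =>
          let r := pyDelete cu ans ll stack
          (r.1, r.2.1, r.2.2.2, r.2.2.1)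
      | none => s                              -- answer[None]: TypeError, outside Pre_
    else if w = "Z" then
      let r := pyUndo ans ll stack
      (r.1, r.2.1, cur, r.2.2)
    else
      let up := w = "U"                        -- prev_or_next = 0 if c[0] == 'U' else 1
      match PySem.List.pyGet? t 1 with
      | none => s                              -- c[1]: IndexError, outside Pre_
      | some s1 =>
        match PySem.Int.ofStr? s1 with
        | none => s                            -- int(c[1]): ValueError, outside Pre_
        | some x => (ans, ll, pyMove cur up x ll, stack)

def solution (n : Int) (k : Int) (cmd : List String) : String :=
  let ans : List String := List.replicate n.toNat "O"
  let ll : LLDict := (PySem.List.pyRange 0 n 1).foldl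
      (fun d i => d.insert i (some (i - 1), some (i + 1))) PySem.Dict.empty
  let ll := ll.insert 0 (none, some 1)
  let ll := ll.insert (n - 1) (some (n - 2), none)
  let st := cmd.foldl (stepA n) (ans, ll, some k, [])
  PySem.Str.join "" st.1

-- ===== PORT B =====

-- while j < n and j in deleted: j += 1
def scanUpB (n : Int) (del : PySem.Set Int) (j : Int) : Int :=
  if h : j < n ∧ del.contains j = true then scanUpB n del (j + 1) else j
termination_by (n - j).toNat
decreasing_by omega

-- a strictly-decreasing measure for the unbounded scans: the deleted values still ahead
theorem length_filter_lt_of_witness (l : List Int) (p q : Int → Bool)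
    (hpq : ∀ x ∈ l, p x = true → q x = true) (a : Int) (ha : a ∈ l)
    (hqa : q a = true) (hpa : p a = false) :
    (l.filter p).length < (l.filter q).length := by
  rw [← List.countP_eq_length_filter, ← List.countP_eq_length_filter]
  induction l with
  | nil => simp at ha
  | cons b l ih =>
    rw [List.countP_cons, List.countP_cons]
    rcases List.mem_cons.1 ha with hb | hb
    · subst hb
      rw [hpa, hqa]
      have : l.countP p ≤ l.countP q := List.countP_mono_left (fun x hx => hpq x (List.mem_cons_of_mem _ hx))
      simp; omega
    · have h1 := ih (fun x hx => hpq x (List.mem_cons_of_mem _ hx)) hb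
      have h2 : (if p b = true then 1 else 0) ≤ (if q b = true then 1 else 0) := by
        by_cases hp : p b = true
        · rw [if_pos hp, if_pos (hpq b (List.mem_cons_self) hp)]
        · simp [hp]
      omega

theorem scan_measure_down (del : List Int) (j : Int) (h : del.contains j = true) :
    (del.filter (fun x => decide (x ≤ j - 1))).length < (del.filter (fun x => decide (x ≤ j))).length := by
  refine length_filter_lt_of_witness del _ _ (fun x _ hx => ?_) j (List.mem_of_elem_eq_true h) (by simp) (by simp)
  simp at hx ⊢; omega

-- while j in deleted: j -= 1
def scanDown (del : PySem.Set Int) (j : Int) : Int :=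
  if h : del.contains j = true then scanDown del (j - 1) else j
termination_by (del.filter (fun x => decide (x ≤ j))).length
decreasing_by exact scan_measure_down del j h

theorem scan_measure_up (del : List Int) (j : Int) (h : del.contains j = true) :
    (del.filter (fun x => decide (j + 1 ≤ x))).length < (del.filter (fun x => decide (j ≤ x))).length := by
  refine length_filter_lt_of_witness del _ _ (fun x _ hx => ?_) j (List.mem_of_elem_eq_true h) (by simp) (by simp)
  simp at hx ⊢; omega

-- while j in deleted: j += 1
def scanUpF (del : PySem.Set Int) (j : Int) : Int :=
  if h : del.contains j = true then scanUpF del (j + 1) else j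
termination_by (del.filter (fun x => decide (j ≤ x))).length
decreasing_by exact scan_measure_up del j h

def stepB (n : Int)
    (s : List String × PySem.Set Int × List Int × Int) (c : String) :
    List String × PySem.Set Int × List Int × Int :=
  let (ans, del, undo, cur) := s
  let t := PySem.Str.split₀ c
  match t with
  | [] => s                                    -- t[0]: IndexError, outside Pre_
  | w :: _ =>
    if w = "C" then
      let ans := PySem.List.pySetD ans cur "X"
      let del := del.add cur
      let undo := undo ++ [cur]
      let j := scanUpB n del (cur + 1)
      let cur := if j < n then j else scanDown del (cur - 1)
      (ans, del, undo, cur)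
    else if w = "Z" then
      match undo.getLast? with
      | none => s                              -- undo.pop(): IndexError, outside Pre_
      | some y => (PySem.List.pySetD ans y "O", del.discard y, undo.dropLast, cur)
    else
      match PySem.List.pyGet? t 1 with
      | none => s
      | some s1 =>
        match PySem.Int.ofStr? s1 with
        | none => s
        | some x =>
          let cur := if w = "U" then
              (List.range x.toNat).foldl (fun c _ => scanDown del (c - 1)) cur
            else
              (List.range x.toNat).foldl (fun c _ => scanUpF del (c + 1)) cur
          (ans, del, undo, cur)

def solution_alt (n : Int) (k : Int) (cmd : List String) : String :=
  let ans : List String := List.replicate n.toNat "O"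
  let st := cmd.foldl (stepB n) (ans, PySem.Set.empty, [], k)
  PySem.Str.join "" st.1

-- ===== PRECONDITION & SPEC =====

-- fuel-based twins of the scans (structural recursion, so that Pre_ is kernel-decidable;
-- proved equal to prevA/nextA below)
def prevAF (del : PySem.Set Int) : Nat → Int → Option Int
  | 0, _ => none
  | f + 1, j => if j < 0 then none else if del.contains j = true then prevAF del f (j - 1) else some j

def nextAF (n : Int) (del : PySem.Set Int) : Nat → Int → Option Int
  | 0, _ => none
  | f + 1, j => if n ≤ j then none else if del.contains j = true then nextAF n del f (j + 1) else some j

def iterPrevF (del : PySem.Set Int) (c : Int) : Nat → Option Int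
  | 0 => some c
  | m + 1 => match prevAF del c.toNat (c - 1) with
             | none => none
             | some c' => iterPrevF del c' m

def iterNextF (n : Int) (del : PySem.Set Int) (c : Int) : Nat → Option Int
  | 0 => some c
  | m + 1 => match nextAF n del (n - c - 1).toNat (c + 1) with
             | none => none
             | some c' => iterNextF n del c' m

-- validity checker for an edit script: the cursor is only ever moved across live
-- rows, a deletion always leaves at least one row, an undo needs a prior deletion
def check (n : Int) (del : PySem.Set Int) (undo : List Int) (cur : Int) :
    List String → Bool
  | [] => true
  | c :: rest =>
    let t := PySem.Str.split₀ c
    match t with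
    | [] => false
    | w :: _ =>
      if w = "C" then
        if 2 ≤ n - (del.length : Int) then
          let del' := del.add cur
          match nextAF n del' (n - cur).toNat (cur + 1) with
          | some j => check n del' (undo ++ [cur]) j rest
          | none =>
            match prevAF del' cur.toNat (cur - 1) with
            | some j => check n del' (undo ++ [cur]) j rest
            | none => false
        else false
      else if w = "Z" then
        match undo.getLast? with
        | none => false
        | some y => check n (del.discard y) undo.dropLast cur rest
      else
        match PySem.List.pyGet? t 1 with
        | none => false
        | some s1 =>
          match PySem.Int.ofStr? s1 with
          | none => false
          | some x =>
            match (if w = "U" then iterPrevF del cur x.toNat else iterNextF n del cur x.toNat) with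
            | none => false
            | some c' => check n del undo c' rest

-- Pre_ excludes scripts that make A raise (bad tokens, undo without a deletion,
-- deleting the only row, moving past the table edge) and, with a non-empty script,
-- the degenerate tables n ≤ 1 / out-of-range k, where a step off the edge that A
-- happens never to dereference again is an accident of its half-initialized links.
def Pre_solution (n : Int) (k : Int) (cmd : List String) : Prop :=
  cmd = [] ∨ (2 ≤ n ∧ 0 ≤ k ∧ k < n ∧ check n PySem.Set.empty [] k cmd = true)
instance (n : Int) (k : Int) (cmd : List String) : Decidable (Pre_solution n k cmd) := by
  unfold Pre_solution; infer_instance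

def pvWitness_solution : Int × Int × List String := (4, 0, ["D 1", "C", "C", "Z", "U 1"])

def Spec_solution (n : Int) (k : Int) (cmd : List String) (out : String) : Prop := out = solution_alt n k cmd
instance (n : Int) (k : Int) (cmd : List String) (out : String) : Decidable (Spec_solution n k cmd out) := by unfold Spec_solution; infer_instance

-- ===== CLAIM (what is proved, stated in full; the proofs are below) =====
def Claim_equal_solution : Prop := ∀ (n : Int) (k : Int) (cmd : List String), Dom_solution n k cmd → Pre_solution n k cmd → Spec_solution n k cmd (solution n k cmd)

-- ===== LEMMAS AND PROOFS =====


-- nearest live row strictly below / above, as total scans guarded at the table edge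
def prevA (del : PySem.Set Int) (j : Int) : Option Int :=
  if j < 0 then none
  else if del.contains j = true then prevA del (j - 1) else some j
termination_by (j + 1).toNat
decreasing_by omega

def nextA (n : Int) (del : PySem.Set Int) (j : Int) : Option Int :=
  if n ≤ j then none
  else if del.contains j = true then nextA n del (j + 1) else some j
termination_by (n - j).toNat
decreasing_by omega

def iterPrev (del : PySem.Set Int) (c : Int) : Nat → Option Int
  | 0 => some c
  | m + 1 => match prevA del (c - 1) with
             | none => none
             | some c' => iterPrev del c' m

def iterNext (n : Int) (del : PySem.Set Int) (c : Int) : Nat → Option Int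
  | 0 => some c
  | m + 1 => match nextA n del (c + 1) with
             | none => none
             | some c' => iterNext n del c' m

-- characterizations of the edge-guarded scans (everything else is derived from these)
theorem prevA_eq_some_iff (del : PySem.Set Int) (j y : Int) :
    prevA del j = some y ↔ 0 ≤ y ∧ y ≤ j ∧ y ∉ del ∧ ∀ w, y < w → w ≤ j → w ∈ del := by
  fun_induction prevA del j with
  | case1 j h => simp; intro _ hy _; omega
  | case2 j h hc ih =>
    rw [ih]
    have hj : j ∈ del := (PySem.Set.contains_iff _ _).1 hc
    constructor
    · rintro ⟨h1, h2, h3, h4⟩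
      refine ⟨h1, by omega, h3, fun w hw1 hw2 => ?_⟩
      rcases eq_or_lt_of_le hw2 with rfl | hlt
      · exact hj
      · exact h4 w hw1 (by omega)
    · rintro ⟨h1, h2, h3, h4⟩
      have : y ≠ j := fun hyj => h3 (hyj ▸ hj)
      exact ⟨h1, by omega, h3, fun w hw1 hw2 => h4 w hw1 (by omega)⟩
  | case3 j h hc =>
    have hj : j ∉ del := fun hm => hc ((PySem.Set.contains_iff _ _).2 hm)
    constructor
    · rintro ⟨rfl⟩
      exact ⟨by omega, le_refl _, hj, fun w hw1 hw2 => by omega⟩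
    · rintro ⟨h1, h2, h3, h4⟩
      rcases eq_or_lt_of_le h2 with rfl | hlt
      · rfl
      · exact absurd (h4 j hlt (le_refl _)) hj

theorem prevA_eq_none_iff (del : PySem.Set Int) (j : Int) :
    prevA del j = none ↔ ∀ w, 0 ≤ w → w ≤ j → w ∈ del := by
  fun_induction prevA del j with
  | case1 j h => simp; intro w hw1 hw2; omega
  | case2 j h hc ih =>
    rw [ih]
    have hj : j ∈ del := (PySem.Set.contains_iff _ _).1 hc
    constructor
    · intro h4 w hw1 hw2
      rcases eq_or_lt_of_le hw2 with rfl | hlt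
      · exact hj
      · exact h4 w hw1 (by omega)
    · intro h4 w hw1 hw2
      exact h4 w hw1 (by omega)
  | case3 j h hc =>
    have hj : j ∉ del := fun hm => hc ((PySem.Set.contains_iff _ _).2 hm)
    simp
    exact ⟨j, by omega, le_refl _, hj⟩

theorem nextA_eq_some_iff (n : Int) (del : PySem.Set Int) (j y : Int) :
    nextA n del j = some y ↔ j ≤ y ∧ y < n ∧ y ∉ del ∧ ∀ w, j ≤ w → w < y → w ∈ del := by
  fun_induction nextA n del j with
  | case1 j h => simp; intro _ hy _; omega
  | case2 j h hc ih =>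
    rw [ih]
    have hj : j ∈ del := (PySem.Set.contains_iff _ _).1 hc
    constructor
    · rintro ⟨h1, h2, h3, h4⟩
      refine ⟨by omega, h2, h3, fun w hw1 hw2 => ?_⟩
      rcases eq_or_lt_of_le hw1 with rfl | hlt
      · exact hj
      · exact h4 w (by omega) hw2
    · rintro ⟨h1, h2, h3, h4⟩
      have : y ≠ j := fun hyj => h3 (hyj ▸ hj)
      exact ⟨by omega, h2, h3, fun w hw1 hw2 => h4 w (by omega) hw2⟩
  | case3 j h hc =>
    have hj : j ∉ del := fun hm => hc ((PySem.Set.contains_iff _ _).2 hm)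
    constructor
    · rintro ⟨rfl⟩
      exact ⟨le_refl _, by omega, hj, fun w hw1 hw2 => by omega⟩
    · rintro ⟨h1, h2, h3, h4⟩
      rcases eq_or_lt_of_le h1 with rfl | hlt
      · rfl
      · exact absurd (h4 j (le_refl _) hlt) hj

theorem nextA_eq_none_iff (n : Int) (del : PySem.Set Int) (j : Int) :
    nextA n del j = none ↔ ∀ w, j ≤ w → w < n → w ∈ del := by
  fun_induction nextA n del j with
  | case1 j h => simp; intro w hw1 hw2; omega
  | case2 j h hc ih =>
    rw [ih]
    have hj : j ∈ del := (PySem.Set.contains_iff _ _).1 hc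
    constructor
    · intro h4 w hw1 hw2
      rcases eq_or_lt_of_le hw1 with rfl | hlt
      · exact hj
      · exact h4 w (by omega) hw2
    · intro h4 w hw1 hw2
      exact h4 w (by omega) hw2
  | case3 j h hc =>
    have hj : j ∉ del := fun hm => hc ((PySem.Set.contains_iff _ _).2 hm)
    simp
    exact ⟨j, le_refl _, by omega, hj⟩

-- B's raw scans agree with the guarded scans wherever the latter succeed
theorem scanDown_eq (del : PySem.Set Int) (j : Int) :
    ∀ y, prevA del j = some y → scanDown del j = y := by
  fun_induction scanDown del j with
  | case1 j hc ih =>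
    intro y hy
    apply ih
    have hj : j ∈ del := (PySem.Set.contains_iff _ _).1 hc
    rw [prevA_eq_some_iff] at hy ⊢
    obtain ⟨h1, h2, h3, h4⟩ := hy
    have : y ≠ j := fun hyj => h3 (hyj ▸ hj)
    exact ⟨h1, by omega, h3, fun w hw1 hw2 => h4 w hw1 (by omega)⟩
  | case2 j hc =>
    intro y hy
    rw [prevA_eq_some_iff] at hy
    obtain ⟨h1, h2, h3, h4⟩ := hy
    rcases eq_or_lt_of_le h2 with rfl | hlt
    · rfl
    · exact absurd ((PySem.Set.contains_iff _ _).2 (h4 j hlt (le_refl _))) (by simpa using hc)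

theorem scanUpB_eq (n : Int) (del : PySem.Set Int) (j : Int) :
    ∀ y, nextA n del j = some y → scanUpB n del j = y := by
  fun_induction scanUpB n del j with
  | case1 j h ih =>
    intro y hy
    apply ih
    have hj : j ∈ del := (PySem.Set.contains_iff _ _).1 h.2
    rw [nextA_eq_some_iff] at hy ⊢
    obtain ⟨h1, h2, h3, h4⟩ := hy
    have : y ≠ j := fun hyj => h3 (hyj ▸ hj)
    exact ⟨by omega, h2, h3, fun w hw1 hw2 => h4 w (by omega) hw2⟩
  | case2 j h =>
    intro y hy
    rw [nextA_eq_some_iff] at hy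
    obtain ⟨h1, h2, h3, h4⟩ := hy
    rcases eq_or_lt_of_le h1 with rfl | hlt
    · rfl
    · have : j ∈ del := h4 j (le_refl _) hlt
      exact absurd ⟨by omega, (PySem.Set.contains_iff _ _).2 this⟩ h

theorem scanUpB_none (n : Int) (del : PySem.Set Int) (j : Int) :
    nextA n del j = none → j ≤ n → scanUpB n del j = n := by
  fun_induction scanUpB n del j with
  | case1 j h ih =>
    intro hy _
    apply ih ?_ (by omega)
    rw [nextA_eq_none_iff] at hy ⊢
    intro w hw1 hw2
    exact hy w (by omega) hw2
  | case2 j h =>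
    intro hy hj
    rcases eq_or_lt_of_le hj with rfl | hlt
    · rfl
    · rw [nextA_eq_none_iff] at hy
      exact absurd ⟨hlt, (PySem.Set.contains_iff _ _).2 (hy j (le_refl _) hlt)⟩ h

theorem scanUpF_eq (n : Int) (del : PySem.Set Int) (j : Int) :
    ∀ y, nextA n del j = some y → scanUpF del j = y := by
  intro y
  fun_induction scanUpF del j with
  | case1 j hc ih =>
    intro hy
    apply ih
    have hj : j ∈ del := (PySem.Set.contains_iff _ _).1 hc
    rw [nextA_eq_some_iff] at hy ⊢
    obtain ⟨h1, h2, h3, h4⟩ := hy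
    have : y ≠ j := fun hyj => h3 (hyj ▸ hj)
    exact ⟨by omega, h2, h3, fun w hw1 hw2 => h4 w (by omega) hw2⟩
  | case2 j hc =>
    intro hy
    rw [nextA_eq_some_iff] at hy
    obtain ⟨h1, h2, h3, h4⟩ := hy
    rcases eq_or_lt_of_le h1 with rfl | hlt
    · rfl
    · exact absurd ((PySem.Set.contains_iff _ _).2 (h4 j (le_refl _) hlt)) (by simpa using hc)


-- "big" is "small" plus one extra deleted row y
def InsRel (big small : PySem.Set Int) (y : Int) : Prop :=
  (∀ w, w ∈ big ↔ w ∈ small ∨ w = y) ∧ y ∉ small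

theorem prevA_stable {big small : PySem.Set Int} {y : Int} (h : InsRel big small y)
    (j : Int) (hne : prevA small j ≠ some y) : prevA big j = prevA small j := by
  cases hr : prevA small j with
  | none =>
    rw [prevA_eq_none_iff] at hr ⊢
    exact fun w hw1 hw2 => (h.1 w).2 (Or.inl (hr w hw1 hw2))
  | some u =>
    have hu : u ≠ y := fun huy => hne (huy ▸ hr)
    rw [prevA_eq_some_iff] at hr ⊢
    obtain ⟨h1, h2, h3, h4⟩ := hr
    refine ⟨h1, h2, fun hm => ?_, fun w hw1 hw2 => (h.1 w).2 (Or.inl (h4 w hw1 hw2))⟩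
    rcases (h.1 u).1 hm with hm | hm
    · exact h3 hm
    · exact hu hm

theorem nextA_stable {big small : PySem.Set Int} {y : Int} (h : InsRel big small y)
    (n j : Int) (hne : nextA n small j ≠ some y) : nextA n big j = nextA n small j := by
  cases hr : nextA n small j with
  | none =>
    rw [nextA_eq_none_iff] at hr ⊢
    exact fun w hw1 hw2 => (h.1 w).2 (Or.inl (hr w hw1 hw2))
  | some u =>
    have hu : u ≠ y := fun huy => hne (huy ▸ hr)
    rw [nextA_eq_some_iff] at hr ⊢
    obtain ⟨h1, h2, h3, h4⟩ := hr
    refine ⟨h1, h2, fun hm => ?_, fun w hw1 hw2 => (h.1 w).2 (Or.inl (h4 w hw1 hw2))⟩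
    rcases (h.1 u).1 hm with hm | hm
    · exact h3 hm
    · exact hu hm

theorem prevA_small_pred_ne {small : PySem.Set Int} {y : Int} (j : Int) :
    prevA small (y - 1) = some y → False := by
  intro hr
  rw [prevA_eq_some_iff] at hr
  omega

theorem nextA_small_succ_ne {small : PySem.Set Int} {n y : Int} :
    nextA n small (y + 1) = some y → False := by
  intro hr
  rw [nextA_eq_some_iff] at hr
  omega

theorem adj_next {d : PySem.Set Int} {n x y : Int} (hx : x ∉ d) (hxn : x < n)
    (hp : prevA d (x - 1) = some y) : nextA n d (y + 1) = some x := by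
  rw [prevA_eq_some_iff] at hp
  obtain ⟨h1, h2, h3, h4⟩ := hp
  rw [nextA_eq_some_iff]
  exact ⟨by omega, hxn, hx, fun w hw1 hw2 => h4 w (by omega) (by omega)⟩

theorem adj_prev {d : PySem.Set Int} {n x y : Int} (hx : x ∉ d) (hx0 : 0 ≤ x)
    (hp : nextA n d (x + 1) = some y) : prevA d (y - 1) = some x := by
  rw [nextA_eq_some_iff] at hp
  obtain ⟨h1, h2, h3, h4⟩ := hp
  rw [prevA_eq_some_iff]
  exact ⟨hx0, by omega, hx, fun w hw1 hw2 => h4 w (by omega) (by omega)⟩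

theorem add_insrel {del : PySem.Set Int} {z : Int} (h : z ∉ del) :
    InsRel (del.add z) del z :=
  ⟨fun w => PySem.Set.mem_add del z w, h⟩

theorem discard_insrel {del : PySem.Set Int} {y : Int} (h : y ∈ del) :
    InsRel del (del.discard y) y := by
  refine ⟨fun w => ?_, by simp [PySem.Set.mem_discard]⟩
  rw [PySem.Set.mem_discard]
  constructor
  · intro hw
    by_cases hwy : w = y
    · exact Or.inr hwy
    · exact Or.inl ⟨hw, hwy⟩
  · rintro (⟨hw, _⟩ | rfl)
    · exact hw
    · exact h

theorem add_discard_self {del : PySem.Set Int} {z : Int} (h : z ∉ del) :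
    (del.add z).discard z = del := by
  rw [PySem.Set.add_of_not_mem h]
  show List.filter _ _ = _
  rw [List.filter_append]
  have h1 : del.filter (fun y => !y == z) = del :=
    List.filter_eq_self.2 (fun a ha => by simp; exact fun hz => h (hz ▸ ha))
  simp [h1]

theorem length_add_of_not_mem {del : PySem.Set Int} {z : Int} (h : z ∉ del) :
    (del.add z).length = del.length + 1 := by
  rw [PySem.Set.add_of_not_mem h]; simp

theorem length_discard_le (del : PySem.Set Int) (y : Int) :
    (del.discard y).length ≤ del.length :=
  List.length_filter_le _ _

-- a foldl whose body ignores the list element is an iterate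
theorem foldl_ignore {α β : Type} (g : α → α) (l : List β) (i : α) :
    l.foldl (fun c _ => g c) i = g^[l.length] i := by
  induction l generalizing i with
  | nil => rfl
  | cons b l ih => rw [List.foldl_cons, ih, List.length_cons, Function.iterate_succ_apply]

-- the initial dict built by the comprehension
theorem getD_foldl_insert_not_mem (l : List Int) (f : Int → Option Int × Option Int)
    (d : LLDict) (x : Int) (v : Option Int × Option Int) (hx : x ∉ l) :
    (l.foldl (fun d i => d.insert i (f i)) d).getD x v = d.getD x v := by
  induction l generalizing d with
  | nil => rfl
  | cons a l ih =>
    rw [List.foldl_cons, ih _ (fun hm => hx (List.mem_cons_of_mem _ hm))]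
    exact PySem.Dict.getD_insert_of_ne d (f a) v (fun h => hx (h ▸ List.mem_cons_self))

theorem getD_foldl_insert_mem (l : List Int) (f : Int → Option Int × Option Int)
    (d : LLDict) (x : Int) (v : Option Int × Option Int) (hx : x ∈ l) :
    (l.foldl (fun d i => d.insert i (f i)) d).getD x v = f x := by
  induction l generalizing d with
  | nil => simp at hx
  | cons a l ih =>
    rw [List.foldl_cons]
    by_cases hm : x ∈ l
    · exact ih _ hm
    · have hxa : x = a := by rcases List.mem_cons.1 hx with h | h; exact h; exact absurd h hm
      subst hxa
      rw [getD_foldl_insert_not_mem l f _ x v hm]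
      exact PySem.Dict.getD_insert_self d x (f x) v

-- a Nodup deleted set bounded by [0, n) that is smaller than n leaves a live row

-- invariant: on live rows, A's dict stores exactly the nearest live neighbours
def InvLL (n : Int) (ll : LLDict) (del : PySem.Set Int) : Prop :=
  ∀ x : Int, 0 ≤ x → x < n → x ∉ del →
    ll.getD x (none, none) = (prevA del (x - 1), nextA n del (x + 1))

-- invariant: A's undo stack vs B's, from the top down; each popped row is re-inserted
-- between the stored neighbours, which are its live neighbours at pop time, and the
-- dict still holds the stale entry of every deleted row
def SR (n : Int) (ll : LLDict) :
    PySem.Set Int → List (Option Int × Int × Option Int) → List Int → Prop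
  | del, [], [] => del = ([] : List Int)
  | del, (p, x, nx) :: st, y :: ys =>
      y = x ∧ x ∈ del ∧ 0 ≤ x ∧ x < n ∧
      p = prevA (del.discard x) (x - 1) ∧ nx = nextA n (del.discard x) (x + 1) ∧
      ll.getD x (none, none) = (p, nx) ∧ SR n ll (del.discard x) st ys
  | _, [], _ :: _ => False
  | _, _ :: _, [] => False

theorem SR_patch (n : Int) (ll ll' : LLDict) :
    ∀ (del : PySem.Set Int) (st : List (Option Int × Int × Option Int)) (ys : List Int),
    (∀ x, x ∈ del → ll'.getD x (none, none) = ll.getD x (none, none)) →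
    SR n ll del st ys → SR n ll' del st ys := by
  intro del st ys
  induction st generalizing del ys with
  | nil =>
    cases ys with
    | nil => intro _ h; exact h
    | cons y ys => intro _ h; exact absurd h (by simp [SR])
  | cons e st ih =>
    cases ys with
    | nil => intro _ h; exact absurd h (by simp [SR])
    | cons y ys =>
      obtain ⟨p, x, nx⟩ := e
      intro hsame h
      rw [SR] at h ⊢
      obtain ⟨h1, h2, h3, h4, h5, h6, h7, h8⟩ := h
      refine ⟨h1, h2, h3, h4, h5, h6, ?_, ?_⟩
      · rw [hsame x h2]; exact h7
      · exact ih (del.discard x) ys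
          (fun z hz => hsame z ((PySem.Set.mem_discard del x z).1 hz).1) h8

-- the combined simulation invariant between A's and B's loop states
def INV (n : Int) (ansA : List String) (ll : LLDict)
    (stack : List (Option Int × Int × Option Int))
    (ansB : List String) (del : PySem.Set Int) (undo : List Int) (cur : Int) : Prop :=
  ansA = ansB ∧
  0 ≤ cur ∧ cur < n ∧ cur ∉ del ∧
  del.Nodup ∧ (∀ x ∈ del, 0 ≤ x ∧ x < n) ∧ (del.length : Int) < n ∧
  InvLL n ll del ∧
  SR n ll del stack.reverse undo.reverse

-- the initial doubly linked list satisfies the invariant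
theorem prevA_nil (j : Int) : prevA ([] : PySem.Set Int) j = if j < 0 then none else some j := by
  rw [prevA.eq_def]
  by_cases h : j < 0 <;> simp [h]

theorem nextA_nil (n j : Int) : nextA n ([] : PySem.Set Int) j = if n ≤ j then none else some j := by
  rw [nextA.eq_def]
  by_cases h : n ≤ j <;> simp [h]

def llInit (n : Int) : LLDict :=
  (((PySem.List.pyRange 0 n 1).foldl
      (fun d i => d.insert i (some (i - 1), some (i + 1))) PySem.Dict.empty).insert
        0 (none, some 1)).insert (n - 1) (some (n - 2), none)

theorem InvLL_init (n : Int) (hn : 2 ≤ n) : InvLL n (llInit n) ([] : PySem.Set Int) := by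
  intro x hx0 hxn _
  rw [prevA_nil, nextA_nil]
  unfold llInit
  by_cases hlast : x = n - 1
  · subst hlast
    rw [PySem.Dict.getD_insert_self]
    have h1 : ¬ (n - 1 - 1 < 0) := by omega
    have e : n - 1 - 1 = n - 2 := by omega
    rw [if_neg h1, if_pos (by omega : n ≤ n - 1 + 1), e]
  · rw [PySem.Dict.getD_insert_of_ne _ _ _ hlast]
    by_cases hzero : x = 0
    · subst hzero
      rw [PySem.Dict.getD_insert_self]
      have h1 : (0 : Int) - 1 < 0 := by omega
      have h2 : ¬ (n ≤ 0 + 1) := by omega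
      simp [h1, h2]
      omega
    · rw [PySem.Dict.getD_insert_of_ne _ _ _ hzero]
      rw [getD_foldl_insert_mem _ _ _ _ _ (by rw [PySem.List.mem_pyRange_one]; omega)]
      have h1 : ¬ (x - 1 < 0) := by omega
      have h2 : ¬ (n ≤ x + 1) := by omega
      simp [h1, h2]

theorem solution_unfold (n k : Int) (cmd : List String) :
    solution n k cmd =
      PySem.Str.join ""
        (cmd.foldl (stepA n) (List.replicate n.toNat "O", llInit n, some k, [])).1 := rfl

theorem solution_alt_unfold (n k : Int) (cmd : List String) :
    solution_alt n k cmd =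
      PySem.Str.join ""
        (cmd.foldl (stepB n) (List.replicate n.toNat "O", PySem.Set.empty, [], k)).1 := rfl


-- deleting the current row when a live row exists below (next ≠ None)
theorem delete_sync_next (n : Int) (ansA ansB : List String) (ll : LLDict)
    (stack : List (Option Int × Int × Option Int)) (del : PySem.Set Int)
    (undo : List Int) (cur : Int) (m : Int)
    (hinv : INV n ansA ll stack ansB del undo cur)
    (hcnt : 2 ≤ n - (del.length : Int))
    (hnx : nextA n (del.add cur) (cur + 1) = some m) :
    ∃ ll', pyDelete cur ansA ll stack =
        (PySem.List.pySetD ansA cur "X", ll',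
         stack ++ [(prevA del (cur - 1), cur, nextA n del (cur + 1))], some m) ∧
      scanUpB n (del.add cur) (cur + 1) = m ∧ m < n ∧
      INV n (PySem.List.pySetD ansA cur "X") ll'
        (stack ++ [(prevA del (cur - 1), cur, nextA n del (cur + 1))])
        (PySem.List.pySetD ansB cur "X") (del.add cur) (undo ++ [cur]) m := by
  obtain ⟨hans, hc0, hcn, hcd, hnd, hbnd, hlen, hll, hsr⟩ := hinv
  have hrel : InsRel (del.add cur) del cur := add_insrel hcd
  have hnx0 : nextA n del (cur + 1) = some m := by
    rw [← nextA_stable hrel n (cur + 1) (fun hr => nextA_small_succ_ne hr)]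
    exact hnx
  have hmspec := (nextA_eq_some_iff n (del.add cur) (cur + 1) m).1 hnx
  obtain ⟨hm1, hm2, hm3, hm4⟩ := hmspec
  have hmdel : m ∉ del := fun hr => hm3 ((hrel.1 m).2 (Or.inl hr))
  have hmne : m ≠ cur := by omega
  have hgetD : ll.getD cur (none, none) = (prevA del (cur - 1), nextA n del (cur + 1)) :=
    hll cur hc0 hcn hcd
  -- the patched dict in each branch
  have hmll : ll.getD m (none, none) = (prevA del (m - 1), nextA n del (m + 1)) :=
    hll m (by omega) hm2 hmdel
  have hmnext_stable : nextA n (del.add cur) (m + 1) = nextA n del (m + 1) :=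
    nextA_stable hrel n (m + 1) (fun hr => by rw [nextA_eq_some_iff] at hr; omega)
  cases hp : prevA del (cur - 1) with
  | none =>
    have hp_all := (prevA_eq_none_iff del (cur - 1)).1 hp
    refine ⟨ll.modify m (none, none) (fun q => (none, q.2)), ?_, ?_, hm2, ?_⟩
    · simp only [pyDelete, hgetD, hp, hnx0]
      simp only [reduceCtorEq, if_false, if_true]
      rw [PySem.Dict.getD_modify_of_ne ll (none, none) _ (Ne.symm hmne), hgetD, hnx0]
    · exact scanUpB_eq n _ _ m hnx
    · refine ⟨by rw [hans], by omega, hm2, hm3, PySem.Set.nodup_add del cur hnd, ?_, ?_, ?_, ?_⟩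
      · intro x hx
        rcases (hrel.1 x).1 hx with hx | rfl
        · exact hbnd x hx
        · exact ⟨hc0, hcn⟩
      · rw [length_add_of_not_mem hcd]; push_cast; omega
      · -- InvLL
        intro x hx0 hxn hxdel
        have hxcur : x ≠ cur := fun h => hxdel ((hrel.1 x).2 (Or.inr h))
        have hxdelS : x ∉ del := fun h => hxdel ((hrel.1 x).2 (Or.inl h))
        by_cases hxm : x = m
        · subst hxm
          rw [PySem.Dict.getD_modify, if_pos rfl, hmll]
          have e1 : prevA (del.add cur) (x - 1) = none := by
            rw [prevA_eq_none_iff]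
            intro w hw1 hw2
            by_cases hwc : w ≤ cur - 1
            · exact (hrel.1 w).2 (Or.inl (hp_all w hw1 hwc))
            · by_cases hwc2 : w = cur
              · exact (hrel.1 w).2 (Or.inr hwc2)
              · exact hm4 w (by omega) (by omega)
          rw [e1, hmnext_stable]
        · rw [PySem.Dict.getD_modify_of_ne ll (none, none) _ hxm, hll x hx0 hxn hxdelS]
          have e1 : prevA (del.add cur) (x - 1) = prevA del (x - 1) :=
            prevA_stable hrel (x - 1) (fun hr => by
              have := adj_next hxdelS hxn hr
              rw [hnx0] at this
              exact hxm (by injection this with h2; omega))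
          have e2 : nextA n (del.add cur) (x + 1) = nextA n del (x + 1) :=
            nextA_stable hrel n (x + 1) (fun hr => by
              have := adj_prev hxdelS hx0 hr
              rw [hp] at this
              simp at this)
          rw [e1, e2]
      · -- SR
        rw [List.reverse_append, List.reverse_append]
        simp only [List.reverse_singleton, List.singleton_append]
        rw [SR]
        have hdisc : (del.add cur).discard cur = del := add_discard_self hcd
        refine ⟨rfl, (hrel.1 cur).2 (Or.inr rfl), hc0, hcn, by rw [hdisc, hp], by rw [hdisc, hnx0], ?_, ?_⟩
        · rw [PySem.Dict.getD_modify_of_ne ll (none, none) _ (Ne.symm hmne), hgetD, hp, hnx0]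
        · rw [hdisc]
          refine SR_patch n ll _ del stack.reverse undo.reverse (fun x hx => ?_) hsr
          exact PySem.Dict.getD_modify_of_ne ll (none, none) _ (fun h => hmdel (by rw [← h]; exact hx))
  | some p =>
    have hpspec := (prevA_eq_some_iff del (cur - 1) p).1 hp
    obtain ⟨hp1, hp2, hp3, hp4⟩ := hpspec
    have hpne : p ≠ cur := by omega
    have hpm : p ≠ m := by omega
    have hpll : ll.getD p (none, none) = (prevA del (p - 1), nextA n del (p + 1)) :=
      hll p hp1 (by omega) hp3
    refine ⟨(ll.modify p (none, none) (fun q => (q.1, some m))).modify m (none, none)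
        (fun q => (some p, q.2)), ?_, ?_, hm2, ?_⟩
    · simp only [pyDelete, hgetD, hp, hnx0]
      simp only [reduceCtorEq, if_false]
      rw [PySem.Dict.getD_modify_of_ne _ (none, none) _ (Ne.symm hmne),
          PySem.Dict.getD_modify_of_ne ll (none, none) _ (Ne.symm hpne), hgetD, hnx0]
    · exact scanUpB_eq n _ _ m hnx
    · refine ⟨by rw [hans], by omega, hm2, hm3, PySem.Set.nodup_add del cur hnd, ?_, ?_, ?_, ?_⟩
      · intro x hx
        rcases (hrel.1 x).1 hx with hx | rfl
        · exact hbnd x hx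
        · exact ⟨hc0, hcn⟩
      · rw [length_add_of_not_mem hcd]; push_cast; omega
      · intro x hx0 hxn hxdel
        have hxcur : x ≠ cur := fun h => hxdel ((hrel.1 x).2 (Or.inr h))
        have hxdelS : x ∉ del := fun h => hxdel ((hrel.1 x).2 (Or.inl h))
        by_cases hxm : x = m
        · subst hxm
          rw [PySem.Dict.getD_modify, if_pos rfl,
              PySem.Dict.getD_modify_of_ne ll (none, none) _ hpm.symm, hmll]
          have e1 : prevA (del.add cur) (x - 1) = some p := by
            rw [prevA_eq_some_iff]
            refine ⟨hp1, by omega, fun hr => ?_, fun w hw1 hw2 => ?_⟩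
            · rcases (hrel.1 p).1 hr with hr | hr
              · exact hp3 hr
              · exact hpne hr
            · by_cases hwc : w ≤ cur - 1
              · exact (hrel.1 w).2 (Or.inl (hp4 w (by omega) hwc))
              · by_cases hwc2 : w = cur
                · exact (hrel.1 w).2 (Or.inr hwc2)
                · exact hm4 w (by omega) (by omega)
          rw [e1, hmnext_stable]
        · by_cases hxp : x = p
          · subst hxp
            rw [PySem.Dict.getD_modify_of_ne _ (none, none) _ hxm,
                PySem.Dict.getD_modify, if_pos rfl, hpll]
            have e1 : prevA (del.add cur) (x - 1) = prevA del (x - 1) :=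
              prevA_stable hrel (x - 1) (fun hr => by rw [prevA_eq_some_iff] at hr; omega)
            have e2 : nextA n (del.add cur) (x + 1) = some m := by
              rw [nextA_eq_some_iff]
              refine ⟨by omega, hm2, hm3, fun w hw1 hw2 => ?_⟩
              by_cases hwc : w ≤ cur - 1
              · exact (hrel.1 w).2 (Or.inl (hp4 w (by omega) hwc))
              · by_cases hwc2 : w = cur
                · exact (hrel.1 w).2 (Or.inr hwc2)
                · exact hm4 w (by omega) hw2
            rw [e1, e2]
          · rw [PySem.Dict.getD_modify_of_ne _ (none, none) _ hxm,
                PySem.Dict.getD_modify_of_ne ll (none, none) _ hxp, hll x hx0 hxn hxdelS]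
            have e1 : prevA (del.add cur) (x - 1) = prevA del (x - 1) :=
              prevA_stable hrel (x - 1) (fun hr => by
                have := adj_next hxdelS hxn hr
                rw [hnx0] at this
                exact hxm (by injection this with h2; omega))
            have e2 : nextA n (del.add cur) (x + 1) = nextA n del (x + 1) :=
              nextA_stable hrel n (x + 1) (fun hr => by
                have := adj_prev hxdelS hx0 hr
                rw [hp] at this
                exact hxp (by injection this with h2; omega))
            rw [e1, e2]
      · rw [List.reverse_append, List.reverse_append]
        simp only [List.reverse_singleton, List.singleton_append]
        rw [SR]
        have hdisc : (del.add cur).discard cur = del := add_discard_self hcd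
        refine ⟨rfl, (hrel.1 cur).2 (Or.inr rfl), hc0, hcn, by rw [hdisc, hp], by rw [hdisc, hnx0], ?_, ?_⟩
        · rw [PySem.Dict.getD_modify_of_ne _ (none, none) _ (Ne.symm hmne),
              PySem.Dict.getD_modify_of_ne ll (none, none) _ (Ne.symm hpne), hgetD, hp, hnx0]
        · rw [hdisc]
          refine SR_patch n ll _ del stack.reverse undo.reverse (fun x hx => ?_) hsr
          rw [PySem.Dict.getD_modify_of_ne _ (none, none) _ (fun h => hmdel (by rw [← h]; exact hx)),
              PySem.Dict.getD_modify_of_ne ll (none, none) _ (fun h => hp3 (by rw [← h]; exact hx))]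


-- deleting the current row when it is the last live row (next = None)
theorem delete_sync_prev (n : Int) (ansA ansB : List String) (ll : LLDict)
    (stack : List (Option Int × Int × Option Int)) (del : PySem.Set Int)
    (undo : List Int) (cur : Int) (pj : Int)
    (hinv : INV n ansA ll stack ansB del undo cur)
    (hcnt : 2 ≤ n - (del.length : Int))
    (hnx : nextA n (del.add cur) (cur + 1) = none)
    (hpv : prevA (del.add cur) (cur - 1) = some pj) :
    ∃ ll', pyDelete cur ansA ll stack =
        (PySem.List.pySetD ansA cur "X", ll',
         stack ++ [(prevA del (cur - 1), cur, nextA n del (cur + 1))], some pj) ∧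
      ¬ scanUpB n (del.add cur) (cur + 1) < n ∧ scanDown (del.add cur) (cur - 1) = pj ∧
      INV n (PySem.List.pySetD ansA cur "X") ll'
        (stack ++ [(prevA del (cur - 1), cur, nextA n del (cur + 1))])
        (PySem.List.pySetD ansB cur "X") (del.add cur) (undo ++ [cur]) pj := by
  obtain ⟨hans, hc0, hcn, hcd, hnd, hbnd, hlen, hll, hsr⟩ := hinv
  have hrel : InsRel (del.add cur) del cur := add_insrel hcd
  have hnx0 : nextA n del (cur + 1) = none := by
    rw [← nextA_stable hrel n (cur + 1) (fun hr => nextA_small_succ_ne hr)]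
    exact hnx
  have hnx_all := (nextA_eq_none_iff n (del.add cur) (cur + 1)).1 hnx
  have hp0 : prevA del (cur - 1) = some pj := by
    rw [← prevA_stable hrel (cur - 1) (fun hr => prevA_small_pred_ne (cur - 1) hr)]
    exact hpv
  have hpspec := (prevA_eq_some_iff (del.add cur) (cur - 1) pj).1 hpv
  obtain ⟨hq1, hq2, hq3, hq4⟩ := hpspec
  have hpdel : pj ∉ del := fun hr => hq3 ((hrel.1 pj).2 (Or.inl hr))
  have hpne : pj ≠ cur := by omega
  have hgetD : ll.getD cur (none, none) = (prevA del (cur - 1), nextA n del (cur + 1)) :=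
    hll cur hc0 hcn hcd
  have hpll : ll.getD pj (none, none) = (prevA del (pj - 1), nextA n del (pj + 1)) :=
    hll pj hq1 (by omega) hpdel
  refine ⟨ll.modify pj (none, none) (fun q => (q.1, none)), ?_, ?_, ?_, ?_⟩
  · simp only [pyDelete, hgetD, hp0, hnx0]
    simp only [reduceCtorEq, if_false, if_true]
    rw [PySem.Dict.getD_modify_of_ne ll (none, none) _ (Ne.symm hpne), hgetD, hp0]
  · rw [scanUpB_none n _ _ hnx (by omega)]; omega
  · exact scanDown_eq _ _ pj hpv
  · refine ⟨by rw [hans], hq1, by omega, hq3, PySem.Set.nodup_add del cur hnd, ?_, ?_, ?_, ?_⟩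
    · intro x hx
      rcases (hrel.1 x).1 hx with hx | rfl
      · exact hbnd x hx
      · exact ⟨hc0, hcn⟩
    · rw [length_add_of_not_mem hcd]; push_cast; omega
    · intro x hx0 hxn hxdel
      have hxcur : x ≠ cur := fun h => hxdel ((hrel.1 x).2 (Or.inr h))
      have hxdelS : x ∉ del := fun h => hxdel ((hrel.1 x).2 (Or.inl h))
      by_cases hxp : x = pj
      · subst hxp
        rw [PySem.Dict.getD_modify, if_pos rfl, hpll]
        have e1 : prevA (del.add cur) (x - 1) = prevA del (x - 1) :=
          prevA_stable hrel (x - 1) (fun hr => by rw [prevA_eq_some_iff] at hr; omega)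
        have e2 : nextA n (del.add cur) (x + 1) = none := by
          rw [nextA_eq_none_iff]
          intro w hw1 hw2
          by_cases hwc : w ≤ cur - 1
          · exact hq4 w (by omega) hwc
          · by_cases hwc2 : w = cur
            · exact (hrel.1 w).2 (Or.inr hwc2)
            · exact hnx_all w (by omega) hw2
        rw [e1, e2]
      · rw [PySem.Dict.getD_modify_of_ne ll (none, none) _ hxp, hll x hx0 hxn hxdelS]
        have e1 : prevA (del.add cur) (x - 1) = prevA del (x - 1) :=
          prevA_stable hrel (x - 1) (fun hr => by
            have := adj_next hxdelS hxn hr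
            rw [hnx0] at this
            simp at this)
        have e2 : nextA n (del.add cur) (x + 1) = nextA n del (x + 1) :=
          nextA_stable hrel n (x + 1) (fun hr => by
            have := adj_prev hxdelS hx0 hr
            rw [hp0] at this
            exact hxp (by injection this with h2; omega))
        rw [e1, e2]
    · rw [List.reverse_append, List.reverse_append]
      simp only [List.reverse_singleton, List.singleton_append]
      rw [SR]
      have hdisc : (del.add cur).discard cur = del := add_discard_self hcd
      refine ⟨rfl, (hrel.1 cur).2 (Or.inr rfl), hc0, hcn, by rw [hdisc, hp0], by rw [hdisc, hnx0], ?_, ?_⟩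
      · rw [PySem.Dict.getD_modify_of_ne ll (none, none) _ (Ne.symm hpne), hgetD, hp0, hnx0]
      · rw [hdisc]
        refine SR_patch n ll _ del stack.reverse undo.reverse (fun x hx => ?_) hsr
        exact PySem.Dict.getD_modify_of_ne ll (none, none) _ (fun h => hpdel (by rw [← h]; exact hx))


-- undoing the most recent deletion
theorem undo_sync (n : Int) (ansA ansB : List String) (ll : LLDict)
    (stack : List (Option Int × Int × Option Int)) (del : PySem.Set Int)
    (undo : List Int) (cur : Int) (y : Int)
    (hinv : INV n ansA ll stack ansB del undo cur)
    (hy : undo.getLast? = some y) :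
    ∃ ll', pyUndo ansA ll stack = (PySem.List.pySetD ansA y "O", ll', stack.dropLast) ∧
      INV n (PySem.List.pySetD ansA y "O") ll' stack.dropLast
        (PySem.List.pySetD ansB y "O") (del.discard y) undo.dropLast cur := by
  obtain ⟨hans, hc0, hcn, hcd, hnd, hbnd, hlen, hll, hsr⟩ := hinv
  rw [← List.head?_reverse] at hy
  obtain ⟨ys, hys⟩ : ∃ ys, undo.reverse = y :: ys := by
    cases h : undo.reverse with
    | nil => rw [h] at hy; simp at hy
    | cons a t => rw [h] at hy; simp at hy; exact ⟨t, by rw [hy]⟩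
  have hundo : undo = ys.reverse ++ [y] := by
    have := congrArg List.reverse hys
    simpa using this
  have hundoDrop : undo.dropLast.reverse = ys := by
    rw [hundo, List.dropLast_concat, List.reverse_reverse]
  cases hstk : stack.reverse with
  | nil => rw [hstk, hys] at hsr; exact absurd hsr (by simp [SR])
  | cons e st' =>
    obtain ⟨p, x, nx⟩ := e
    rw [hstk, hys, SR] at hsr
    obtain ⟨hyx, hydel, hy0, hyn, hp, hnx, hyll, htail⟩ := hsr
    subst hyx
    have hstack : stack = st'.reverse ++ [(p, y, nx)] := by
      have := congrArg List.reverse hstk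
      simpa using this
    have hstackLast : stack.getLast? = some (p, y, nx) := by
      rw [hstack, List.getLast?_concat]
    have hstackDrop : stack.dropLast.reverse = st' := by
      rw [hstack, List.dropLast_concat, List.reverse_reverse]
    set del' := del.discard y with hdel'
    have hrel : InsRel del del' y := discard_insrel hydel
    have hcur' : cur ∉ del' := fun h => hcd ((PySem.Set.mem_discard del y cur).1 h).1
    have hcy : cur ≠ y := fun h => hcd (h ▸ hydel)
    have hnd' : del'.Nodup := PySem.Set.nodup_discard del y hnd
    have hbnd' : ∀ z ∈ del', 0 ≤ z ∧ z < n := fun z hz =>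
      hbnd z ((PySem.Set.mem_discard del y z).1 hz).1
    have hlen' : (del'.length : Int) < n := by
      have h2 := length_discard_le del y
      rw [← hdel'] at h2
      omega
    -- the stored neighbours cannot both be None: cur is live and distinct from y
    have hnotboth : ¬ (p = none ∧ nx = none) := by
      rintro ⟨hp0, hnx0⟩
      rw [hp0] at hp
      rw [hnx0] at hnx
      rw [eq_comm, prevA_eq_none_iff] at hp
      rw [eq_comm, nextA_eq_none_iff] at hnx
      rcases lt_or_ge cur y with h | h
      · exact hcur' (hp cur hc0 (by omega))
      · exact hcur' (hnx cur (by omega) hcn)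
    -- common facts
    have hlive_inv : ∀ z, 0 ≤ z → z < n → z ∉ del' → z ≠ y →
        ll.getD z (none, none) = (prevA del (z - 1), nextA n del (z + 1)) := by
      intro z h0 h1 h2 h3
      exact hll z h0 h1 (fun hzd => h2 ((PySem.Set.mem_discard del y z).2 ⟨hzd, h3⟩))
    have stable_other : ∀ z, 0 ≤ z → z < n → z ∉ del' → z ≠ y →
        (nextA n del' (y + 1) ≠ some z) → (p ≠ some z) →
        (prevA del (z - 1), nextA n del (z + 1)) = (prevA del' (z - 1), nextA n del' (z + 1)) := by
      intro z h0 h1 h2 h3 h4 h5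
      have hzdel : z ∉ del := fun hzd => h2 ((PySem.Set.mem_discard del y z).2 ⟨hzd, h3⟩)
      have e1 : prevA del (z - 1) = prevA del' (z - 1) :=
        prevA_stable hrel (z - 1) (fun hr => h4 (adj_next h2 h1 hr))
      have e2 : nextA n del (z + 1) = nextA n del' (z + 1) :=
        nextA_stable hrel n (z + 1) (fun hr => h5 (by rw [hp, adj_prev h2 h0 hr]))
      rw [e1, e2]
    have hINVrest : ansA = ansB ∧ 0 ≤ cur ∧ cur < n ∧ cur ∉ del' ∧ del'.Nodup ∧
        (∀ z ∈ del', 0 ≤ z ∧ z < n) ∧ ((del'.length : Int) < n) :=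
      ⟨hans, hc0, hcn, hcur', hnd', hbnd', hlen'⟩
    cases hnxc : nx with
    | none =>
      obtain ⟨pp, hppe⟩ : ∃ pp, p = some pp := by
        cases hpc : p
        · exact absurd ⟨hpc, hnxc⟩ hnotboth
        · exact ⟨_, rfl⟩
      subst hppe hnxc
      have hppv : prevA del' (y - 1) = some pp := hp.symm
      have hmv : nextA n del' (y + 1) = none := hnx.symm
      have hppspec := (prevA_eq_some_iff del' (y - 1) pp).1 hppv
      obtain ⟨hq1, hq2, hq3, hq4⟩ := hppspec
      have hppy : pp ≠ y := by omega
      have hppdel : pp ∉ del := fun h => hq3 ((PySem.Set.mem_discard del y pp).2 ⟨h, hppy⟩)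
      have hppll := hlive_inv pp hq1 (by omega) hq3 hppy
      refine ⟨ll.modify pp (none, none) (fun q => (q.1, some y)), ?_, by rw [hans], hc0, hcn,
        hcur', hnd', hbnd', hlen', ?_, ?_⟩
      · simp only [pyUndo, hstackLast]
        simp
      · intro z h0 h1 h2
        by_cases hzy : z = y
        · subst hzy
          rw [PySem.Dict.getD_modify_of_ne ll (none, none) _ (Ne.symm hppy), hyll, ← hp, ← hnx]
        · by_cases hzp : z = pp
          · subst hzp
            rw [PySem.Dict.getD_modify, if_pos rfl, hppll]
            have e1 : prevA del (z - 1) = prevA del' (z - 1) :=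
              prevA_stable hrel (z - 1) (fun hr => by rw [prevA_eq_some_iff] at hr; omega)
            have e2 : nextA n del' (z + 1) = some y := adj_next hrel.2 hyn hppv
            rw [e1, e2]
          · rw [PySem.Dict.getD_modify_of_ne ll (none, none) _ hzp, hlive_inv z h0 h1 h2 hzy,
                stable_other z h0 h1 h2 hzy
                  (fun hr => by rw [hr] at hmv; simp at hmv)
                  (fun h => hzp (by injection h with h2'; omega))]
      · rw [hstackDrop, hundoDrop]
        refine SR_patch n ll _ del' st' ys (fun z hz => ?_) htail
        exact PySem.Dict.getD_modify_of_ne ll (none, none) _ (fun h => hq3 (by rw [← h]; exact hz))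
    | some mm =>
      have hmv : nextA n del' (y + 1) = some mm := by rw [← hnx, hnxc]
      have hmmspec := (nextA_eq_some_iff n del' (y + 1) mm).1 hmv
      obtain ⟨hm1, hm2, hm3, hm4⟩ := hmmspec
      have hmmy : mm ≠ y := by omega
      have hmmdel : mm ∉ del := fun h => hm3 ((PySem.Set.mem_discard del y mm).2 ⟨h, hmmy⟩)
      have hmmll := hlive_inv mm (by omega) hm2 hm3 hmmy
      have hmmprev : prevA del' (mm - 1) = some y := adj_prev hrel.2 hy0 hmv
      have hmmnext : nextA n del (mm + 1) = nextA n del' (mm + 1) :=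
        nextA_stable hrel n (mm + 1) (fun hr => by rw [nextA_eq_some_iff] at hr; omega)
      cases hpc : p with
      | none =>
        subst hpc hnxc
        have hpv : prevA del' (y - 1) = none := hp.symm
        refine ⟨ll.modify mm (none, none) (fun q => (some y, q.2)), ?_, by rw [hans], hc0, hcn,
          hcur', hnd', hbnd', hlen', ?_, ?_⟩
        · simp only [pyUndo, hstackLast]
          simp
        · intro z h0 h1 h2
          by_cases hzy : z = y
          · subst hzy
            rw [PySem.Dict.getD_modify_of_ne ll (none, none) _ (Ne.symm hmmy), hyll, ← hp, ← hnx]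
          · by_cases hzm : z = mm
            · subst hzm
              rw [PySem.Dict.getD_modify, if_pos rfl, hmmll, hmmprev, hmmnext]
            · rw [PySem.Dict.getD_modify_of_ne ll (none, none) _ hzm, hlive_inv z h0 h1 h2 hzy,
                  stable_other z h0 h1 h2 hzy
                    (fun hr => hzm (by rw [hmv] at hr; injection hr with h2'; omega))
                    (fun h => by simp at h)]
        · rw [hstackDrop, hundoDrop]
          refine SR_patch n ll _ del' st' ys (fun z hz => ?_) htail
          exact PySem.Dict.getD_modify_of_ne ll (none, none) _ (fun h => hm3 (by rw [← h]; exact hz))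
      | some pp =>
        subst hpc hnxc
        have hppv : prevA del' (y - 1) = some pp := hp.symm
        have hppspec := (prevA_eq_some_iff del' (y - 1) pp).1 hppv
        obtain ⟨hq1, hq2, hq3, hq4⟩ := hppspec
        have hppy : pp ≠ y := by omega
        have hppmm : pp ≠ mm := by omega
        have hppdel : pp ∉ del := fun h => hq3 ((PySem.Set.mem_discard del y pp).2 ⟨h, hppy⟩)
        have hppll := hlive_inv pp hq1 (by omega) hq3 hppy
        refine ⟨(ll.modify mm (none, none) (fun q => (some y, q.2))).modify pp (none, none)
            (fun q => (q.1, some y)), ?_, by rw [hans], hc0, hcn,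
          hcur', hnd', hbnd', hlen', ?_, ?_⟩
        · simp only [pyUndo, hstackLast]
          simp
        · intro z h0 h1 h2
          by_cases hzy : z = y
          · subst hzy
            rw [PySem.Dict.getD_modify_of_ne _ (none, none) _ (Ne.symm hppy),
                PySem.Dict.getD_modify_of_ne ll (none, none) _ (Ne.symm hmmy), hyll, ← hp, ← hnx]
          · by_cases hzp : z = pp
            · subst hzp
              rw [PySem.Dict.getD_modify, if_pos rfl,
                  PySem.Dict.getD_modify_of_ne ll (none, none) _ hppmm, hppll]
              have e1 : prevA del (z - 1) = prevA del' (z - 1) :=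
                prevA_stable hrel (z - 1) (fun hr => by rw [prevA_eq_some_iff] at hr; omega)
              have e2 : nextA n del' (z + 1) = some y := adj_next hrel.2 hyn hppv
              rw [e1, e2]
            · by_cases hzm : z = mm
              · subst hzm
                rw [PySem.Dict.getD_modify_of_ne _ (none, none) _ hzp,
                    PySem.Dict.getD_modify, if_pos rfl, hmmll, hmmprev, hmmnext]
              · rw [PySem.Dict.getD_modify_of_ne _ (none, none) _ hzp,
                    PySem.Dict.getD_modify_of_ne ll (none, none) _ hzm,
                    hlive_inv z h0 h1 h2 hzy,
                    stable_other z h0 h1 h2 hzy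
                      (fun hr => hzm (by rw [hmv] at hr; injection hr with h2'; omega))
                      (fun h => hzp (by injection h with h2'; omega))]
        · rw [hstackDrop, hundoDrop]
          refine SR_patch n ll _ del' st' ys (fun z hz => ?_) htail
          rw [PySem.Dict.getD_modify_of_ne _ (none, none) _ (fun h => hq3 (by rw [← h]; exact hz)),
              PySem.Dict.getD_modify_of_ne ll (none, none) _ (fun h => hm3 (by rw [← h]; exact hz))]

-- moving the cursor: each hop follows A's stored neighbour and B's scan alike
theorem moveU_aux (n : Int) (ll : LLDict) (del : PySem.Set Int) (hll : InvLL n ll del) :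
    ∀ (m : Nat) (cur c' : Int), 0 ≤ cur → cur < n → cur ∉ del →
      iterPrev del cur m = some c' →
      ((fun c : Option Int => match c with
          | some r => (ll.getD r (none, none)).1
          | none => none)^[m] (some cur) = some c')
      ∧ ((fun c : Int => scanDown del (c - 1))^[m] cur = c')
      ∧ (0 ≤ c' ∧ c' < n ∧ c' ∉ del) := by
  intro m
  induction m with
  | zero =>
    intro cur c' h0 h1 h2 hiter
    simp only [iterPrev] at hiter
    injection hiter with h
    subst h
    exact ⟨rfl, rfl, h0, h1, h2⟩
  | succ m ih =>
    intro cur c' h0 h1 h2 hiter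
    simp only [iterPrev] at hiter
    cases hpv : prevA del (cur - 1) with
    | none => rw [hpv] at hiter; simp at hiter
    | some c1 =>
      rw [hpv] at hiter
      have hspec := (prevA_eq_some_iff del (cur - 1) c1).1 hpv
      obtain ⟨g1, g2, g3, g4⟩ := hspec
      have hstepA : (match some cur with
          | some r => (PySem.Dict.getD ll r (none, none)).1
          | none => none) = some c1 := by
        simp [hll cur h0 h1 h2, hpv]
      have hstepB : scanDown del (cur - 1) = c1 := scanDown_eq del (cur - 1) c1 hpv
      obtain ⟨e1, e2, e3⟩ := ih c1 c' g1 (by omega) g3 hiter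
      refine ⟨?_, ?_, e3⟩
      · rw [Function.iterate_succ_apply, hstepA, e1]
      · rw [Function.iterate_succ_apply]
        simp only [hstepB, e2]

theorem moveD_aux (n : Int) (ll : LLDict) (del : PySem.Set Int) (hll : InvLL n ll del) :
    ∀ (m : Nat) (cur c' : Int), 0 ≤ cur → cur < n → cur ∉ del →
      iterNext n del cur m = some c' →
      ((fun c : Option Int => match c with
          | some r => (ll.getD r (none, none)).2
          | none => none)^[m] (some cur) = some c')
      ∧ ((fun c : Int => scanUpF del (c + 1))^[m] cur = c')
      ∧ (0 ≤ c' ∧ c' < n ∧ c' ∉ del) := by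
  intro m
  induction m with
  | zero =>
    intro cur c' h0 h1 h2 hiter
    simp only [iterNext] at hiter
    injection hiter with h
    subst h
    exact ⟨rfl, rfl, h0, h1, h2⟩
  | succ m ih =>
    intro cur c' h0 h1 h2 hiter
    simp only [iterNext] at hiter
    cases hpv : nextA n del (cur + 1) with
    | none => rw [hpv] at hiter; simp at hiter
    | some c1 =>
      rw [hpv] at hiter
      have hspec := (nextA_eq_some_iff n del (cur + 1) c1).1 hpv
      obtain ⟨g1, g2, g3, g4⟩ := hspec
      have hstepA : (match some cur with
          | some r => (PySem.Dict.getD ll r (none, none)).2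
          | none => none) = some c1 := by
        simp [hll cur h0 h1 h2, hpv]
      have hstepB : scanUpF del (cur + 1) = c1 := scanUpF_eq n del (cur + 1) c1 hpv
      obtain ⟨e1, e2, e3⟩ := ih c1 c' (by omega) g2 g3 hiter
      refine ⟨?_, ?_, e3⟩
      · rw [Function.iterate_succ_apply, hstepA, e1]
      · rw [Function.iterate_succ_apply]
        simp only [hstepB, e2]


-- the fueled scans agree with the guarded scans whenever the fuel covers the range
theorem prevAF_eq (del : PySem.Set Int) : ∀ (f : Nat) (j : Int), j < (f : Int) →
    prevAF del f j = prevA del j := by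
  intro f
  induction f with
  | zero => intro j hj; rw [prevAF, prevA.eq_def, if_pos (by exact_mod_cast hj)]
  | succ f ih =>
    intro j hj
    rw [prevAF]
    by_cases h0 : j < 0
    · rw [if_pos h0, prevA.eq_def, if_pos h0]
    · rw [if_neg h0]
      by_cases hc : del.contains j = true
      · rw [if_pos hc, ih (j - 1) (by push_cast at hj ⊢; omega)]
        conv_rhs => rw [prevA.eq_def]
        rw [if_neg h0, if_pos hc]
      · rw [if_neg hc, prevA.eq_def, if_neg h0, if_neg hc]

theorem nextAF_eq (n : Int) (del : PySem.Set Int) : ∀ (f : Nat) (j : Int), n - j ≤ (f : Int) →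
    nextAF n del f j = nextA n del j := by
  intro f
  induction f with
  | zero => intro j hj; rw [nextAF, nextA.eq_def, if_pos (by exact_mod_cast (by omega : n ≤ j))]
  | succ f ih =>
    intro j hj
    rw [nextAF]
    by_cases h0 : n ≤ j
    · rw [if_pos h0, nextA.eq_def, if_pos h0]
    · rw [if_neg h0]
      by_cases hc : del.contains j = true
      · rw [if_pos hc, ih (j + 1) (by push_cast at hj ⊢; omega)]
        conv_rhs => rw [nextA.eq_def]
        rw [if_neg h0, if_pos hc]
      · rw [if_neg hc, nextA.eq_def, if_neg h0, if_neg hc]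

theorem iterPrevF_eq (del : PySem.Set Int) : ∀ (m : Nat) (c : Int),
    iterPrevF del c m = iterPrev del c m := by
  intro m
  induction m with
  | zero => intro c; rfl
  | succ m ih =>
    intro c
    rw [iterPrevF, iterPrev, prevAF_eq del c.toNat (c - 1) (by omega)]
    cases prevA del (c - 1) with
    | none => rfl
    | some c' => exact ih c'

theorem iterNextF_eq (n : Int) (del : PySem.Set Int) : ∀ (m : Nat) (c : Int),
    iterNextF n del c m = iterNext n del c m := by
  intro m
  induction m with
  | zero => intro c; rfl
  | succ m ih =>
    intro c
    rw [iterNextF, iterNext, nextAF_eq n del (n - c - 1).toNat (c + 1) (by omega)]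
    cases nextA n del (c + 1) with
    | none => rfl
    | some c' => exact ih c'

-- the main simulation: under a valid script the two loop states stay related
theorem main_sync (n : Int) :
    ∀ (cmds : List String) (ansA ansB : List String) (ll : LLDict)
      (stack : List (Option Int × Int × Option Int)) (del : PySem.Set Int)
      (undo : List Int) (cur : Int),
      INV n ansA ll stack ansB del undo cur →
      check n del undo cur cmds = true →
      (cmds.foldl (stepA n) (ansA, ll, some cur, stack)).1 =
      (cmds.foldl (stepB n) (ansB, del, undo, cur)).1 := by
  intro cmds
  induction cmds with
  | nil => intro ansA ansB ll stack del undo cur hinv _; exact hinv.1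
  | cons c rest ih =>
    intro ansA ansB ll stack del undo cur hinv hchk
    rw [List.foldl_cons, List.foldl_cons]
    simp only [check] at hchk
    cases ht : PySem.Str.split₀ c with
    | nil => rw [ht] at hchk; simp at hchk
    | cons w ts =>
      rw [ht] at hchk
      simp only [] at hchk
      by_cases hwC : w = "C"
      · subst hwC
        rw [if_pos rfl] at hchk
        by_cases hcnt : 2 ≤ n - (del.length : Int)
        · rw [if_pos hcnt] at hchk
          rw [nextAF_eq n (del.add cur) (n - cur).toNat (cur + 1) (by omega),
              prevAF_eq (del.add cur) cur.toNat (cur - 1) (by omega)] at hchk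
          have hstepB : stepB n (ansB, del, undo, cur) c =
              (PySem.List.pySetD ansB cur "X", del.add cur, undo ++ [cur],
               if scanUpB n (del.add cur) (cur + 1) < n then scanUpB n (del.add cur) (cur + 1)
               else scanDown (del.add cur) (cur - 1)) := by
            simp only [stepB, ht, if_pos rfl]
            simp
          cases hnx : nextA n (del.add cur) (cur + 1) with
          | some m =>
            rw [hnx] at hchk
            simp only [] at hchk
            obtain ⟨ll', heq, hscan, hmn, hinv'⟩ :=
              delete_sync_next n ansA ansB ll stack del undo cur m hinv hcnt hnx
            have hstepA : stepA n (ansA, ll, some cur, stack) c =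
                (PySem.List.pySetD ansA cur "X", ll',
                 some m, stack ++ [(prevA del (cur - 1), cur, nextA n del (cur + 1))]) := by
              simp only [stepA, ht, if_pos rfl, heq]
              simp
            rw [hstepA, hstepB, hscan, if_pos hmn]
            exact ih _ _ _ _ _ _ _ hinv' hchk
          | none =>
            rw [hnx] at hchk
            cases hpv : prevA (del.add cur) (cur - 1) with
            | none => rw [hpv] at hchk; simp at hchk
            | some pj =>
              rw [hpv] at hchk
              simp only [] at hchk
              obtain ⟨ll', heq, hscan, hdown, hinv'⟩ :=
                delete_sync_prev n ansA ansB ll stack del undo cur pj hinv hcnt hnx hpv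
              have hstepA : stepA n (ansA, ll, some cur, stack) c =
                  (PySem.List.pySetD ansA cur "X", ll',
                   some pj, stack ++ [(prevA del (cur - 1), cur, nextA n del (cur + 1))]) := by
                simp only [stepA, ht, if_pos rfl, heq]
                simp
              rw [hstepA, hstepB, if_neg hscan, hdown]
              exact ih _ _ _ _ _ _ _ hinv' hchk
        · rw [if_neg hcnt] at hchk; simp at hchk
      · by_cases hwZ : w = "Z"
        · subst hwZ
          rw [if_neg hwC, if_pos rfl] at hchk
          cases hyl : undo.getLast? with
          | none => rw [hyl] at hchk; simp at hchk
          | some y =>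
            rw [hyl] at hchk
            simp only [] at hchk
            obtain ⟨ll', heq, hinv'⟩ := undo_sync n ansA ansB ll stack del undo cur y hinv hyl
            have hstepA : stepA n (ansA, ll, some cur, stack) c =
                (PySem.List.pySetD ansA y "O", ll', some cur, stack.dropLast) := by
              simp only [stepA, ht, if_neg hwC, if_pos rfl, heq]
              simp
            have hstepB : stepB n (ansB, del, undo, cur) c =
                (PySem.List.pySetD ansB y "O", del.discard y, undo.dropLast, cur) := by
              simp only [stepB, ht, if_neg hwC, if_pos rfl, hyl]
              simp
            rw [hstepA, hstepB]
            exact ih _ _ _ _ _ _ _ hinv' hchk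
        · rw [if_neg hwC, if_neg hwZ] at hchk
          cases hs1 : PySem.List.pyGet? (w :: ts) 1 with
          | none => rw [hs1] at hchk; simp at hchk
          | some s1 =>
            rw [hs1] at hchk
            simp only [] at hchk
            cases hx : PySem.Int.ofStr? s1 with
            | none => rw [hx] at hchk; simp at hchk
            | some x =>
              rw [hx] at hchk
              simp only [] at hchk
              obtain ⟨hc0, hcn, hcd⟩ : 0 ≤ cur ∧ cur < n ∧ cur ∉ del :=
                ⟨hinv.2.1, hinv.2.2.1, hinv.2.2.2.1⟩
              have hll : InvLL n ll del := hinv.2.2.2.2.2.2.2.1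
              by_cases hU : w = "U"
              · rw [if_pos hU] at hchk
                rw [iterPrevF_eq del x.toNat cur] at hchk
                cases hit : iterPrev del cur x.toNat with
                | none => rw [hit] at hchk; simp at hchk
                | some c' =>
                  rw [hit] at hchk
                  simp only [] at hchk
                  obtain ⟨e1, e2, e3⟩ :=
                    moveU_aux n ll del hll x.toNat cur c' hc0 hcn hcd hit
                  have hbridge : pyMove (some cur) true x ll = some c' := by
                    show (List.range x.toNat).foldl _ (some cur) = some c'
                    rw [foldl_ignore, List.length_range]
                    exact e1
                  have hstepA : stepA n (ansA, ll, some cur, stack) c =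
                      (ansA, ll, some c', stack) := by
                    simp only [stepA, ht, if_neg hwC, if_neg hwZ, hs1, hx]
                    rw [show (decide (w = "U")) = true from by simp [hU], hbridge]
                  have hstepB : stepB n (ansB, del, undo, cur) c =
                      (ansB, del, undo, c') := by
                    simp only [stepB, ht, if_neg hwC, if_neg hwZ, hs1, hx, if_pos hU]
                    rw [foldl_ignore, List.length_range, e2]
                  rw [hstepA, hstepB]
                  refine ih _ _ _ _ _ _ _ ⟨hinv.1, e3.1, e3.2.1, e3.2.2,
                    hinv.2.2.2.2.1, hinv.2.2.2.2.2.1, hinv.2.2.2.2.2.2.1,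
                    hll, hinv.2.2.2.2.2.2.2.2⟩ hchk
              · rw [if_neg hU] at hchk
                rw [iterNextF_eq n del x.toNat cur] at hchk
                cases hit : iterNext n del cur x.toNat with
                | none => rw [hit] at hchk; simp at hchk
                | some c' =>
                  rw [hit] at hchk
                  simp only [] at hchk
                  obtain ⟨e1, e2, e3⟩ :=
                    moveD_aux n ll del hll x.toNat cur c' hc0 hcn hcd hit
                  have hbridge : pyMove (some cur) false x ll = some c' := by
                    show (List.range x.toNat).foldl _ (some cur) = some c'
                    rw [foldl_ignore, List.length_range]
                    exact e1
                  have hstepA : stepA n (ansA, ll, some cur, stack) c =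
                      (ansA, ll, some c', stack) := by
                    simp only [stepA, ht, if_neg hwC, if_neg hwZ, hs1, hx]
                    rw [show (decide (w = "U")) = false from by simp [hU], hbridge]
                  have hstepB : stepB n (ansB, del, undo, cur) c =
                      (ansB, del, undo, c') := by
                    simp only [stepB, ht, if_neg hwC, if_neg hwZ, hs1, hx, if_neg hU]
                    rw [foldl_ignore, List.length_range, e2]
                  rw [hstepA, hstepB]
                  refine ih _ _ _ _ _ _ _ ⟨hinv.1, e3.1, e3.2.1, e3.2.2,
                    hinv.2.2.2.2.1, hinv.2.2.2.2.2.1, hinv.2.2.2.2.2.2.1,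
                    hll, hinv.2.2.2.2.2.2.2.2⟩ hchk

-- ===== VERDICT (by name: the statement is the Claim_ definition above) =====
theorem solution_spec : Claim_equal_solution := by
  unfold Claim_equal_solution
  intro n k cmd _hdom hpre
  unfold Spec_solution
  rcases hpre with rfl | ⟨hn, hk0, hkn, hchk⟩
  · rfl
  · rw [solution_unfold, solution_alt_unfold]
    have hinv : INV n (List.replicate n.toNat "O") (llInit n) []
        (List.replicate n.toNat "O") PySem.Set.empty [] k := by
      refine ⟨rfl, hk0, hkn, by simp [PySem.Set.empty], List.nodup_nil, by simp [PySem.Set.empty], ?_, InvLL_init n hn, rfl⟩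
      simp [PySem.Set.empty]
      omega
    exact congrArg (PySem.Str.join "") (main_sync n cmd _ _ _ _ _ _ _ hinv hchk)
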